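-- pv_equiv track=rewrite | github.com/AP-MI-2021/lab-4-daniaandreea | main.py | get_list_superprimes
-- ===== SOURCE A (Python) =====
-- def is_prime(num):
--     '''
--     Verifică dacă un număr este prim.
--     in: int, numărul de verificat
--     out: True, dacă numărul e prim
--              False, altfel
--     '''
--
--     if num < 2:
--         return False
--     d = 2
--     while d*d <= num:
--         if num % d == 0:
--             return False
--         d += 1
--     return True
--
-- def get_list_superprimes(lst):
--     '''
--     Afiseaza o lista cu toate numerele superprime din lista data.
--     in:lista data
--     out:lista cu numerele superprime
--     '''
--     result=[]
--     for num in lst: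
--         if num>0 and is_prime(num)==True:
--             num=num//10
--             n=num
--             if n>0 and is_prime(n)==True:
--                 result.append(n)
--     return result
-- ===== SOURCE B (Python) =====
-- def get_list_superprimes(lst):
--     '''
--     Lista numerelor superprime (num si num//10 ambele prime) din lista data.
--     Shared prime table: sieve the primes up to floor(sqrt(max(lst))) once,
--     then test each number by dividing only by those primes.
--     '''
--     if not lst:
--         return []
--     m = max(max(lst), 1)
--     # r = floor(sqrt(m))
--     r = 1
--     while (r + 1) * (r + 1) <= m:
--         r += 1
--     # simple sieve up to r
--     flags = [False, False] + [True] * (r - 1)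
--     for d in range(2, r + 1):
--         for j in range(2, r // d + 1):
--             flags[j * d] = False
--     primes = [i for i in range(2, r + 1) if flags[i]]
--
--     def is_p(n):
--         if n < 2:
--             return False
--         for p in primes:
--             if p * p > n:
--                 return True
--             if n % p == 0:
--                 return False
--         return True
--
--     return [num // 10 for num in lst
--             if num > 0 and is_p(num) and num // 10 > 0 and is_p(num // 10)]
-- ===== Notes on version B (the rewrite author's own statement) =====
-- stated objective: faster
-- what changed: Instead of running full trial division on every element, B computes max(lst), sieves all primes up to floor(sqrt(max)) once with a simple sieve, and tests each number (and its //10) by dividing only by those tabulated primes.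
import Mathlib
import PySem

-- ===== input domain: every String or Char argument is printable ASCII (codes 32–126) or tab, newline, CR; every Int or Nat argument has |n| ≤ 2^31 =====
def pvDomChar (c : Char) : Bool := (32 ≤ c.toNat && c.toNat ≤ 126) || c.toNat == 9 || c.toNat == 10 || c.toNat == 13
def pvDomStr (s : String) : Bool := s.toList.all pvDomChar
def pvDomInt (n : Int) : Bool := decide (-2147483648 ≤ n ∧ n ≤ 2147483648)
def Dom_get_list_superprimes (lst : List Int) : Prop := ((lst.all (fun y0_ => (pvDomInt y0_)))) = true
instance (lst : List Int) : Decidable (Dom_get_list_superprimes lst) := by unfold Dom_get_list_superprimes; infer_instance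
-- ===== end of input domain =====

-- B replaces A's per-element trial division by one shared simple sieve of the primes up to
-- floor(sqrt(max(lst))) and divides each number by those primes only (measured faster).

-- ===== PORT A =====
-- while d*d <= num: if num % d == 0: return False; d += 1
def pvIsPrimeLoop (num d : Int) : Bool :=
  if d * d ≤ num then
    if PySem.Int.mod num d = 0 then false else pvIsPrimeLoop num (d + 1)
  else true
termination_by (num + 1 - d).toNat
decreasing_by
  have h1 : d ≤ num := by
    by_cases h : d ≤ 0
    · nlinarith [mul_self_nonneg d]
    · nlinarith
  omega

def is_prime (num : Int) : Bool :=
  if num < 2 then false else pvIsPrimeLoop num 2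

def get_list_superprimes (lst : List Int) : List Int :=
  lst.foldl (fun result num =>
    if decide (num > 0) && is_prime num then
      let num' := PySem.Int.floordiv num 10
      let n := num'
      if decide (n > 0) && is_prime n then result ++ [n] else result
    else result) []

-- ===== PORT B =====
-- r = 1; while (r+1)*(r+1) <= m: r += 1
def pvIsqrtLoop (m r : Int) : Int :=
  if (r + 1) * (r + 1) ≤ m then pvIsqrtLoop m (r + 1) else r
termination_by (m - r).toNat
decreasing_by
  have h1 : r + 1 ≤ m := by
    by_cases h : r + 1 ≤ 0
    · nlinarith [mul_self_nonneg (r + 1)]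
    · nlinarith
  omega

-- flags = [False, False] + [True]*(r-1); for d in range(2, r+1): for j in range(2, r//d+1): flags[j*d] = False
-- (the index j*d is nonnegative and in range there, so List.set at (j*d).toNat is exactly Python's flags[j*d] = False)
def pvSieve (r : Int) : Array Bool :=
  (PySem.List.pyRange 2 (r + 1)).foldl (fun flags d =>
      (PySem.List.pyRange 2 (PySem.Int.floordiv r d + 1)).foldl
        (fun flags j => flags.setIfInBounds (j * d).toNat false) flags)
    (#[false, false] ++ Array.replicate (r - 1).toNat true)

-- primes = [i for i in range(2, r+1) if flags[i]]  (index i is always nonnegative and in range)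
def pvPrimesOf (r : Int) (flags : Array Bool) : List Int :=
  (PySem.List.pyRange 2 (r + 1)).filter (fun i => flags[i.toNat]?.getD false)

-- for p in primes: if p*p > n: return True; if n % p == 0: return False
def pvIsPLoop (n : Int) : List Int → Bool
  | [] => true
  | p :: ps => if p * p > n then true else if PySem.Int.mod n p = 0 then false else pvIsPLoop n ps

def pvIsP (primes : List Int) (n : Int) : Bool :=
  if n < 2 then false else pvIsPLoop n primes

def get_list_superprimes_alt (lst : List Int) : List Int :=
  if lst.isEmpty then []
  else
    let m := max ((PySem.List.max? lst id).getD 0) 1   -- max(max(lst), 1); lst nonempty, the getD default is unused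
    let r := pvIsqrtLoop m 1
    let flags := pvSieve r
    let primes := pvPrimesOf r flags
    lst.filterMap (fun num =>
      if decide (num > 0) && pvIsP primes num &&
         decide (PySem.Int.floordiv num 10 > 0) && pvIsP primes (PySem.Int.floordiv num 10)
      then some (PySem.Int.floordiv num 10) else none)

-- ===== PRECONDITION & SPEC =====
def Spec_get_list_superprimes (lst : List Int) (out : List Int) : Prop := out = get_list_superprimes_alt lst
instance (lst : List Int) (out : List Int) : Decidable (Spec_get_list_superprimes lst out) := by unfold Spec_get_list_superprimes; infer_instance

-- ===== CLAIM (what is proved, stated in full; the proofs are below) =====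
def Claim_equal_get_list_superprimes : Prop := ∀ (lst : List Int), Dom_get_list_superprimes lst → Spec_get_list_superprimes lst (get_list_superprimes lst)

-- ===== LEMMAS AND PROOFS =====

-- A's trial-division loop finds exactly the divisors e with d ≤ e and e*e ≤ num
theorem pvIsPrimeLoop_eq (num d : Int) :
    2 ≤ d → (pvIsPrimeLoop num d = true ↔ ∀ e, d ≤ e → e * e ≤ num → ¬ e ∣ num) := by
  induction d using pvIsPrimeLoop.induct num with
  | case1 d hle hmod =>
    intro hd
    rw [pvIsPrimeLoop, if_pos hle, if_pos hmod]
    simp only [Bool.false_eq_true, false_iff]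
    intro h
    exact h d le_rfl hle ((PySem.Int.mod_eq_zero_iff_dvd _ _).mp hmod)
  | case2 d hle hmod ih =>
    intro hd
    rw [pvIsPrimeLoop, if_pos hle, if_neg hmod, ih (by omega)]
    constructor
    · intro h e hde hsq hdvd
      by_cases he : e = d
      · exact hmod (by rw [PySem.Int.mod_eq_zero_iff_dvd]; exact he ▸ hdvd)
      · exact h e (by omega) hsq hdvd
    · intro h e hde hsq hdvd
      exact h e (by omega) hsq hdvd
  | case3 d hle =>
    intro hd
    rw [pvIsPrimeLoop, if_neg hle]
    simp only [true_iff]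
    intro e hde hsq _
    have : d * d ≤ e * e := by nlinarith
    omega

-- a composite n ≥ 2 has a prime divisor e with e*e ≤ n (its least factor)
theorem has_small_prime_factor {n : Int} (h2 : 2 ≤ n) (hp : ¬ Nat.Prime n.toNat) :
    ∃ e : Int, 2 ≤ e ∧ e * e ≤ n ∧ e ∣ n ∧ Nat.Prime e.toNat := by
  set k := n.toNat with hk
  have hkn : (k : Int) = n := Int.toNat_of_nonneg (by omega)
  have h1 : k ≠ 1 := by omega
  have hkpos : 0 < k := by omega
  have hmp := Nat.minFac_prime h1
  have hsq := Nat.minFac_sq_le_self hkpos hp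
  have hdvd := Nat.minFac_dvd k
  refine ⟨(k.minFac : Int), by exact_mod_cast hmp.two_le, ?_, ?_, ?_⟩
  · rw [← hkn]; exact_mod_cast (by nlinarith [hsq] : k.minFac * k.minFac ≤ k)
  · rw [← hkn]; exact_mod_cast hdvd
  · simpa using hmp

theorem no_small_factor_of_prime {n e : Int} (h2 : 2 ≤ n) (hp : Nat.Prime n.toNat)
    (he : 2 ≤ e) (hsq : e * e ≤ n) : ¬ e ∣ n := by
  intro hdvd
  have hd : e.toNat ∣ n.toNat := by
    rw [← Int.natCast_dvd_natCast]
    rwa [Int.toNat_of_nonneg (by omega), Int.toNat_of_nonneg (by omega)]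
  rcases hp.eq_one_or_self_of_dvd _ hd with h | h
  · omega
  · have : e = n := by omega
    nlinarith

theorem is_prime_iff (n : Int) : is_prime n = true ↔ 2 ≤ n ∧ Nat.Prime n.toNat := by
  unfold is_prime
  split
  · simp only [Bool.false_eq_true, false_iff]
    rintro ⟨h2, -⟩
    omega
  · rename_i h
    have h2 : 2 ≤ n := by omega
    rw [pvIsPrimeLoop_eq n 2 le_rfl]
    constructor
    · intro hall
      refine ⟨h2, ?_⟩
      by_contra hp
      obtain ⟨e, he2, hesq, hedvd, -⟩ := has_small_prime_factor h2 hp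
      exact hall e he2 hesq hedvd
    · rintro ⟨-, hp⟩ e hde hsq
      exact no_small_factor_of_prime h2 hp hde hsq

theorem pvIsqrtLoop_spec (m r : Int) :
    r ≤ pvIsqrtLoop m r ∧ m < (pvIsqrtLoop m r + 1) * (pvIsqrtLoop m r + 1) := by
  induction r using pvIsqrtLoop.induct m with
  | case1 r hle ih =>
    rw [pvIsqrtLoop, if_pos hle]
    exact ⟨by omega, ih.2⟩
  | case2 r hle =>
    rw [pvIsqrtLoop, if_neg hle]
    exact ⟨le_rfl, by omega⟩

-- marking a list of positions false: a position reads false iff it was false or is marked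
theorem foldl_set_false_getElem? {α : Type} (g : α → Nat) (l : List α) (f : Array Bool) (k : Nat) :
    (l.foldl (fun f x => f.setIfInBounds (g x) false) f)[k]? =
      f[k]?.map (fun b => b && !(l.any (fun x => g x == k))) := by
  induction l generalizing f with
  | nil => simp
  | cons x xs ih =>
    simp only [List.foldl_cons, List.any_cons, ih, Array.getElem?_setIfInBounds]
    by_cases h : g x = k
    · subst h
      by_cases hlt : g x < f.size
      · obtain ⟨b, hb⟩ : ∃ b, f[g x]? = some b := ⟨f[g x], Array.getElem?_eq_getElem hlt⟩
        simp [hlt]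
      · have hn : f[g x]? = none := Array.getElem?_eq_none (by omega)
        simp [hlt]
    · have hx : (g x == k) = false := by simp [h]
      simp [hx, h]

theorem foldl_double_set_getElem? (ds : List Int) (F : Int → List Int) (f : Array Bool) (k : Nat) :
    (ds.foldl (fun f d => (F d).foldl (fun f j => f.setIfInBounds (j * d).toNat false) f) f)[k]? =
      f[k]?.map (fun b => b && !(ds.any (fun d => (F d).any (fun j => (j * d).toNat == k)))) := by
  induction ds generalizing f with
  | nil => simp
  | cons d ds ih =>
    simp only [List.foldl_cons, List.any_cons, ih,
      foldl_set_false_getElem? (fun j => (j * d).toNat) (F d) f k]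
    cases hb : f[k]? with
    | none => simp
    | some b => simp [Bool.and_assoc]

-- a cell 2 ≤ i ≤ r is marked iff i is composite
theorem pvSieve_marked_iff {r i : Int} (h2 : 2 ≤ i) (hir : i ≤ r) :
    ((PySem.List.pyRange 2 (r + 1)).any (fun d =>
        ((PySem.List.pyRange 2 (PySem.Int.floordiv r d + 1)).any (fun j => (j * d).toNat == i.toNat)))) = true
      ↔ ¬ Nat.Prime i.toNat := by
  simp only [List.any_eq_true, PySem.List.mem_pyRange_one, beq_iff_eq]
  constructor
  · rintro ⟨d, ⟨hd2, hdr⟩, j, ⟨hj2, hjr⟩, hji⟩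
    have hji' : j * d = i := by
      have h0 : 0 ≤ j * d := by positivity
      omega
    intro hp
    have hdvd : d.toNat ∣ i.toNat := by
      rw [← Int.natCast_dvd_natCast]
      rw [Int.toNat_of_nonneg (by omega), Int.toNat_of_nonneg (by omega)]
      exact ⟨j, by rw [← hji']; ring⟩
    rcases hp.eq_one_or_self_of_dvd _ hdvd with h | h
    · omega
    · have hdi : d = i := by omega
      nlinarith
  · intro hp
    obtain ⟨e, he2, hesq, hedvd, hep⟩ := has_small_prime_factor h2 hp
    obtain ⟨j, hj⟩ := hedvd
    have hej : e * j = i := hj.symm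
    have hj2 : 2 ≤ j := by nlinarith
    have hjr : j * e ≤ r := by nlinarith
    refine ⟨e, ⟨he2, by nlinarith⟩, j, ⟨hj2, ?_⟩, ?_⟩
    · have hle : j ≤ PySem.Int.floordiv r e := by
        rw [PySem.Int.le_floordiv_iff_mul_le (by omega)]
        exact hjr
      omega
    · have hje : j * e = i := by rw [← hej]; ring
      rw [hje]

theorem pvSieve_lookup {r i : Int} (h2 : 2 ≤ i) (hir : i ≤ r) :
    ((pvSieve r)[i.toNat]?.getD false = true ↔ Nat.Prime i.toNat) := by
  have hinit : (#[false, false] ++ Array.replicate (r - 1).toNat true)[i.toNat]? = some true := by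
    rw [← Array.getElem?_toList]
    simp only [Array.toList_append, Array.toList_replicate]
    rw [List.getElem?_append_right (by simp; omega)]
    simp only [List.length_cons, List.length_nil]
    rw [List.getElem?_replicate]
    rw [if_pos (by omega)]
  unfold pvSieve
  rw [foldl_double_set_getElem?]
  rw [hinit]
  simp only [Option.map_some, Option.getD_some, Bool.true_and, Bool.not_eq_eq_eq_not, Bool.not_true]
  rw [Bool.eq_false_iff]
  constructor
  · intro h
    by_contra hp
    exact h ((pvSieve_marked_iff h2 hir).mpr hp)
  · intro hp hmark
    exact (pvSieve_marked_iff h2 hir).mp hmark hp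

theorem mem_pvPrimesOf {r p : Int} : p ∈ pvPrimesOf r (pvSieve r) ↔ 2 ≤ p ∧ p ≤ r ∧ Nat.Prime p.toNat := by
  unfold pvPrimesOf
  rw [List.mem_filter]
  simp only [PySem.List.mem_pyRange_one]
  constructor
  · rintro ⟨⟨h2, hlt⟩, hflag⟩
    exact ⟨h2, by omega, (pvSieve_lookup h2 (by omega)).mp hflag⟩
  · rintro ⟨h2, hle, hp⟩
    exact ⟨⟨h2, by omega⟩, (pvSieve_lookup h2 hle).mpr hp⟩

theorem pvPrimesOf_sorted (r : Int) (flags : Array Bool) : (pvPrimesOf r flags).Pairwise (· < ·) := by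
  apply List.Pairwise.filter
  rw [PySem.List.pyRange_of_pos 2 (r + 1) (by omega : (0:Int) < 1)]
  apply List.Pairwise.map
  · exact fun a b hab => hab
  · exact List.pairwise_lt_range.imp (fun {a b} h => by omega)

-- B's prime-table loop finds exactly the table divisors p with p*p ≤ n
theorem pvIsPLoop_eq {L : List Int} {n : Int} (hL2 : ∀ p ∈ L, 2 ≤ p)
    (hsort : L.Pairwise (· < ·)) :
    pvIsPLoop n L = true ↔ ∀ p ∈ L, p * p ≤ n → ¬ p ∣ n := by
  induction L with
  | nil => simp [pvIsPLoop]
  | cons p ps ih =>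
    have hp2 : 2 ≤ p := hL2 p List.mem_cons_self
    have hps2 : ∀ q ∈ ps, 2 ≤ q := fun q hq => hL2 q (List.mem_cons_of_mem _ hq)
    have hplt : ∀ q ∈ ps, p < q := fun q hq => (List.pairwise_cons.mp hsort).1 q hq
    rw [pvIsPLoop]
    split
    · rename_i hgt
      simp only [true_iff]
      intro q hq hsq
      rcases List.mem_cons.mp hq with h | h
      · subst h; omega
      · exfalso
        have := hplt q h
        nlinarith
    · rename_i hgt
      split
      · rename_i hmod
        simp only [Bool.false_eq_true, false_iff]
        intro hall
        exact hall p List.mem_cons_self (by omega) ((PySem.Int.mod_eq_zero_iff_dvd _ _).mp hmod)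
      · rename_i hmod
        rw [ih hps2 (List.pairwise_cons.mp hsort).2]
        constructor
        · intro h q hq hsq
          rcases List.mem_cons.mp hq with hh | hh
          · subst hh
            intro hdvd
            exact hmod ((PySem.Int.mod_eq_zero_iff_dvd _ _).mpr hdvd)
          · exact h q hh hsq
        · intro h q hq hsq
          exact h q (List.mem_cons_of_mem _ hq) hsq

-- the two primality tests agree on every n ≤ m once the table covers sqrt(m)
theorem pvIsP_eq_is_prime {r m : Int} (hr : 1 ≤ r) (hrm : m < (r + 1) * (r + 1))
    (n : Int) (hn : n ≤ m) : pvIsP (pvPrimesOf r (pvSieve r)) n = is_prime n := by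
  apply Bool.coe_iff_coe.mp
  unfold pvIsP
  rw [is_prime_iff]
  split
  · rename_i h
    simp only [Bool.false_eq_true, false_iff]
    rintro ⟨h2, -⟩
    omega
  · rename_i h
    have h2 : 2 ≤ n := by omega
    rw [pvIsPLoop_eq (fun p hp => (mem_pvPrimesOf.mp hp).1) (pvPrimesOf_sorted r (pvSieve r))]
    constructor
    · intro hall
      refine ⟨h2, ?_⟩
      by_contra hp
      obtain ⟨e, he2, hesq, hedvd, hep⟩ := has_small_prime_factor h2 hp
      have her : e ≤ r := by
        by_contra hc
        have h1 : r + 1 ≤ e := by omega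
        have hsq2 : (r + 1) * (r + 1) ≤ e * e := mul_le_mul h1 h1 (by omega) (by omega)
        omega
      exact hall e (mem_pvPrimesOf.mpr ⟨he2, her, hep⟩) hesq hedvd
    · rintro ⟨-, hp⟩ q hq hsq
      exact no_small_factor_of_prime h2 hp (mem_pvPrimesOf.mp hq).1 hsq

theorem filterMap_if_eq_map_filter {α β : Type} (l : List α) (p : α → Bool) (f : α → β) :
    l.filterMap (fun x => if p x then some (f x) else none) = (l.filter p).map f := by
  induction l with
  | nil => simp
  | cons x xs ih =>
    by_cases h : p x <;> simp [h, ih]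

-- ===== VERDICT (by name: the statement is the Claim_ definition above) =====
theorem get_list_superprimes_spec : Claim_equal_get_list_superprimes := by
  intro lst _
  unfold Spec_get_list_superprimes get_list_superprimes get_list_superprimes_alt
  by_cases hemp : lst = []
  · subst hemp; simp
  · rw [if_neg (by simpa [List.isEmpty_iff] using hemp)]
    set m := max ((PySem.List.max? lst id).getD 0) 1 with hm
    set r := pvIsqrtLoop m 1 with hrdef
    have hr := pvIsqrtLoop_spec m 1
    have hmax : ∀ x ∈ lst, x ≤ m := by
      intro x hx
      rcases ho : PySem.List.max? lst id with - | m0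
      · exact absurd ((PySem.List.max?_eq_none_iff lst id).mp ho) hemp
      · have h1 := PySem.List.max?_isMax ho x hx
        simp only [id] at h1
        rw [hm, ho]
        simp only [Option.getD_some]
        omega
    have hA : (fun (result : List Int) num =>
        if decide (num > 0) && is_prime num then
          let num' := PySem.Int.floordiv num 10
          let n := num'
          if decide (n > 0) && is_prime n then result ++ [n] else result
        else result) =
        (fun (result : List Int) num =>
          if (decide (num > 0) && is_prime num &&
              (decide (PySem.Int.floordiv num 10 > 0) && is_prime (PySem.Int.floordiv num 10)) : Bool)
          then result ++ [PySem.Int.floordiv num 10] else result) := by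
      funext result num
      cases h1 : (decide (num > 0) && is_prime num) <;>
        cases h2 : (decide (PySem.Int.floordiv num 10 > 0) && is_prime (PySem.Int.floordiv num 10)) <;>
          simp only [h1, h2] <;> simp
    rw [hA, PySem.List.foldl_append_if, List.nil_append, filterMap_if_eq_map_filter]
    congr 1
    apply List.filter_congr
    intro num hnum
    have hle := hmax num hnum
    by_cases hpos : num > 0
    · have h1 : pvIsP (pvPrimesOf r (pvSieve r)) num = is_prime num :=
        pvIsP_eq_is_prime hr.1 hr.2 num hle
      have hq : PySem.Int.floordiv num 10 ≤ num := by
        rw [PySem.Int.floordiv_eq_ediv_of_pos (by omega : (0:Int) < 10)]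
        exact Int.ediv_le_self _ (by omega)
      have h2 : pvIsP (pvPrimesOf r (pvSieve r)) (PySem.Int.floordiv num 10) = is_prime (PySem.Int.floordiv num 10) :=
        pvIsP_eq_is_prime hr.1 hr.2 _ (le_trans hq hle)
      rw [h1, h2]
      simp [Bool.and_assoc]
    · simp [hpos]
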